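-- pv_equiv track=rewrite | github.com/zGenny/AdventOfCode23 | Day1/day1-part2.py | traduciRiga
-- ===== SOURCE A (Python) =====
-- listaNumeri = []
--
-- NumeriLettere    = ["one","two","three","four","five","six","seven","eight","nine"]
--
-- def traduciRiga(riga):
--   stringa = ""
--   for i in range(len(riga)):
--     if riga[i] in listaNumeri:
--       stringa += riga[i]
--     else:
--       for j in range(5):
--         if riga[i:i+j+1] in NumeriLettere:
--           stringa += str(NumeriLettere.index(riga[i:i+j+1])+1)
--           break
--
--   return stringa
-- ===== SOURCE B (Python) =====
-- NumeriLettere = ["one","two","three","four","five","six","seven","eight","nine"]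
--
-- def traduciRiga(riga):
--   # word-major: collect every (position, digit) via repeated find, then sort by position
--   matches = []
--   for idx, word in enumerate(NumeriLettere):
--     start = 0
--     while True:
--       pos = riga.find(word, start)
--       if pos == -1:
--         break
--       matches.append((pos, str(idx + 1)))
--       start = pos + 1
--   matches.sort(key=lambda p: p[0])
--   return "".join(d for _, d in matches)
-- ===== Notes on version B (the rewrite author's own statement) =====
-- stated objective: faster
-- what changed: A scans the string position by position in Python, slicing out substrings of lengths 1..5 at every index and testing list membership; B instead loops over the nine number words, collects every occurrence of each word via repeated str.find (advancing start by one to keep overlapping matches), then sorts the (position, digit) hits by position and joins the digits.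
import Mathlib
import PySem

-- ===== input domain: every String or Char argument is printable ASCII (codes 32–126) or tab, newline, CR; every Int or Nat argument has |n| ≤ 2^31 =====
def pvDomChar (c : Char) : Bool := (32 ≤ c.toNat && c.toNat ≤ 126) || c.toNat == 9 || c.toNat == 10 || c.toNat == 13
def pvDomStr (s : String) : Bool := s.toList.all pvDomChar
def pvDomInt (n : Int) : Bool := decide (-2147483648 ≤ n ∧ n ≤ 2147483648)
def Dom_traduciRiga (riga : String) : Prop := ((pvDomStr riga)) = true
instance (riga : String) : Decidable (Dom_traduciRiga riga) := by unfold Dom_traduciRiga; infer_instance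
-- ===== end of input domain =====

-- B re-groups the scan word-by-word (repeated str.find per word, then sort all hits by position)
-- instead of A's position-by-position scan with an inner length loop; measured faster (constant factor).

-- ===== PORT A =====
def listaNumeri : List String := []

def numeriLettere : List String := ["one","two","three","four","five","six","seven","eight","nine"]

-- A's inner 'for j in range(5): … break' loop
def innerA (riga : String) (i : Int) : List Int → String
  | [] => ""
  | j :: js =>
    let sub := PySem.Str.slice riga (some i) (some (i + j + 1))
    if numeriLettere.contains sub then
      PySem.Int.toStr (((PySem.List.index? numeriLettere sub).getD 0 : Int) + 1)
    else innerA riga i js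

def traduciRiga (riga : String) : String :=
  (PySem.List.pyRange 0 (PySem.Str.len riga)).foldl
    (fun stringa i =>
      match PySem.Str.pyGet? riga i with
      | none => stringa   -- unreachable: i ranges over 0 ≤ i < len(riga)
      | some c =>
        if listaNumeri.contains (String.ofList [c]) then stringa ++ String.ofList [c]
        else stringa ++ innerA riga i [0, 1, 2, 3, 4])
    ""

-- ===== PORT B =====
-- B's 'while True: pos = riga.find(word, start) …' loop; fuel bounds the (terminating) while loop
def collectB (riga word digit : String) : Int → Nat → List (Int × String)
  | _, 0 => []
  | start, Nat.succ fuel =>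
    let pos := PySem.Str.findFrom riga word start
    if pos = -1 then []
    else (pos, digit) :: collectB riga word digit (pos + 1) fuel

def traduciRiga_alt (riga : String) : String :=
  let matchlist := (PySem.List.enumerate numeriLettere).foldl
    (fun acc p => acc ++ collectB riga p.2 (PySem.Int.toStr (p.1 + 1)) 0 (riga.toList.length + 1)) []
  PySem.Str.join "" ((PySem.List.sorted matchlist (fun p => p.1)).map (fun p => p.2))

-- ===== PRECONDITION & SPEC =====
def Spec_traduciRiga (riga : String) (out : String) : Prop := out = traduciRiga_alt riga
instance (riga : String) (out : String) : Decidable (Spec_traduciRiga riga out) := by unfold Spec_traduciRiga; infer_instance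

-- ===== CLAIM (what is proved, stated in full; the proofs are below) =====
def Claim_equal_traduciRiga : Prop := ∀ (riga : String), Dom_traduciRiga riga → Spec_traduciRiga riga (traduciRiga riga)

-- ===== LEMMAS AND PROOFS =====

-- proof-side vocabulary
def wordsC : List (List Char) := numeriLettere.map String.toList

def matchIdx (t : List Char) : Option Nat := wordsC.findIdx? (fun w => decide (w <+: t))

def digitAt (t : List Char) : Option String := (matchIdx t).map (fun idx : Nat => PySem.Int.toStr ((idx : Int) + 1))

-- the reference list: every position of s carrying a word match, with its digit, in position order
def target (s : List Char) : List (Int × String) :=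
  (List.range s.length).filterMap
    (fun i => (digitAt (s.drop i)).map (fun d => ((i : Int), d)))

-- all hits of one word, word-major (what one round of B's while loop collects)
def occPairs (s w : List Char) (d : String) : List (Int × String) :=
  ((List.range s.length).filter (fun i => decide (w <+: s.drop i))).map
    (fun i : Nat => ((i : Int), d))

-- basic facts about the nine words
lemma words_len : ∀ w ∈ wordsC, w.length = 3 ∨ w.length = 4 ∨ w.length = 5 := by decide

lemma words_prefix_eq : ∀ w1 ∈ wordsC, ∀ w2 ∈ wordsC, w1 <+: w2 → w1 = w2 := by decide

lemma wordsC_nodup : wordsC.Nodup := by decide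

lemma uniq_prefix {t w1 w2 : List Char} (h1 : w1 ∈ wordsC) (h2 : w2 ∈ wordsC)
    (p1 : w1 <+: t) (p2 : w2 <+: t) : w1 = w2 := by
  rcases List.prefix_or_prefix_of_prefix p1 p2 with h | h
  · exact words_prefix_eq _ h1 _ h2 h
  · exact (words_prefix_eq _ h2 _ h1 h).symm

-- matchIdx characterisation
lemma matchIdx_of_prefix {t : List Char} {idx : Nat} (hidx : idx < wordsC.length)
    (hpre : wordsC[idx] <+: t) : matchIdx t = some idx := by
  cases hm : matchIdx t with
  | none =>
    have := List.findIdx?_eq_none_iff.mp hm wordsC[idx] (List.getElem_mem hidx)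
    simp [hpre] at this
  | some j =>
    obtain ⟨hj, hfind⟩ := List.findIdx?_eq_some_iff_findIdx_eq.mp hm
    have hpj : wordsC[j] <+: t := by
      have := List.findIdx_getElem (p := fun w => decide (w <+: t)) (xs := wordsC)
        (w := by rw [hfind]; exact hj)
      simpa [hfind] using this
    have heq : wordsC[j] = wordsC[idx] :=
      uniq_prefix (List.getElem_mem hj) (List.getElem_mem hidx) hpj hpre
    have : j = idx := (List.Nodup.getElem_inj_iff wordsC_nodup).mp heq
    simp [this]

lemma matchIdx_some_iff {t : List Char} {idx : Nat} :
    matchIdx t = some idx ↔ ∃ w, wordsC[idx]? = some w ∧ w <+: t := by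
  constructor
  · intro hm
    obtain ⟨hj, hfind⟩ := List.findIdx?_eq_some_iff_findIdx_eq.mp hm
    refine ⟨wordsC[idx], by simp [List.getElem?_eq_getElem hj], ?_⟩
    have := List.findIdx_getElem (p := fun w => decide (w <+: t)) (xs := wordsC)
      (w := by rw [hfind]; exact hj)
    simpa [hfind] using this
  · rintro ⟨w, hw, hpre⟩
    obtain ⟨hlt, hg⟩ := List.getElem?_eq_some_iff.mp hw
    exact matchIdx_of_prefix hlt (hg ▸ hpre)

lemma matchIdx_none_iff {t : List Char} :
    matchIdx t = none ↔ ∀ w ∈ wordsC, ¬ w <+: t := by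
  unfold matchIdx
  rw [List.findIdx?_eq_none_iff]
  simp

-- ---------- A-side characterisation ----------

lemma slice_toList (riga : String) (k m : Nat) :
    (PySem.Str.slice riga (some (k : Int)) (some ((k : Int) + (m : Int)))).toList
      = (riga.toList.drop k).take m := by
  have : ((k : Int) + (m : Int)) = ((k + m : Nat) : Int) := by push_cast; ring
  rw [this, PySem.Str.toList_slice, PySem.Chars.slice_eq_listSlice, PySem.List.slice_natCast]
  congr 1
  omega

lemma contains_slice_iff (riga : String) (k m : Nat) :
    numeriLettere.contains (PySem.Str.slice riga (some (k : Int)) (some ((k : Int) + (m : Int)))) = true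
      ↔ (riga.toList.drop k).take m ∈ wordsC := by
  rw [List.contains_iff_mem]
  constructor
  · intro h
    have : (PySem.Str.slice riga (some (k : Int)) (some ((k : Int) + (m : Int)))).toList ∈ wordsC :=
      List.mem_map_of_mem h
    rwa [slice_toList] at this
  · intro h
    obtain ⟨u, hu, hul⟩ := List.mem_map.mp h
    have : PySem.Str.slice riga (some (k : Int)) (some ((k : Int) + (m : Int))) = u := by
      apply String.toList_inj.mp
      rw [slice_toList, hul]
    rwa [this]

lemma contains_slice_false (riga : String) (k m : Nat)
    (h : (riga.toList.drop k).take m ∉ wordsC) :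
    numeriLettere.contains (PySem.Str.slice riga (some (k : Int)) (some ((k : Int) + (m : Int)))) = false := by
  rw [Bool.eq_false_iff]
  intro hc
  exact h ((contains_slice_iff riga k m).mp hc)

lemma take_not_mem {t w : List Char} (hw : w ∈ wordsC) (hpre : w <+: t)
    {m : Nat} (hm : m < w.length) : t.take m ∉ wordsC := by
  intro hmem
  have hp : t.take m <+: t := List.take_prefix m t
  have heq : t.take m = w := uniq_prefix hmem hw hp hpre
  have hlen : w.length ≤ t.length := hpre.length_le
  have : (t.take m).length = m := by simp; omega
  rw [heq] at this
  omega

lemma innerA_eq (riga : String) (k : Nat) :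
    innerA riga (k : Int) [0, 1, 2, 3, 4] = (digitAt (riga.toList.drop k)).getD "" := by
  set t := riga.toList.drop k with ht
  have e1 : ((k : Int) + 0 + 1) = (k : Int) + ((1 : Nat) : Int) := by push_cast; ring
  have e2 : ((k : Int) + 1 + 1) = (k : Int) + ((2 : Nat) : Int) := by push_cast; ring
  have e3 : ((k : Int) + 2 + 1) = (k : Int) + ((3 : Nat) : Int) := by push_cast; ring
  have e4 : ((k : Int) + 3 + 1) = (k : Int) + ((4 : Nat) : Int) := by push_cast; ring
  have e5 : ((k : Int) + 4 + 1) = (k : Int) + ((5 : Nat) : Int) := by push_cast; ring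
  cases hm : matchIdx t with
  | none =>
    have hno : ∀ w ∈ wordsC, ¬ w <+: t := matchIdx_none_iff.mp hm
    have hc : ∀ m : Nat, numeriLettere.contains
        (PySem.Str.slice riga (some (k : Int)) (some ((k : Int) + (m : Int)))) = false := by
      intro m
      apply contains_slice_false
      intro hmem
      exact hno _ hmem (ht ▸ List.take_prefix m t)
    simp only [innerA, e1, e2, e3, e4, e5, hc, Bool.false_eq_true, if_false]
    simp [digitAt, hm]
  | some idx =>
    obtain ⟨w, hwg, hpre⟩ := matchIdx_some_iff.mp hm
    obtain ⟨hidx, hwdef⟩ := List.getElem?_eq_some_iff.mp hwg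
    have hwmem : w ∈ wordsC := hwdef ▸ List.getElem_mem hidx
    have hcf : ∀ m : Nat, m < w.length → numeriLettere.contains
        (PySem.Str.slice riga (some (k : Int)) (some ((k : Int) + (m : Int)))) = false := by
      intro m hmlt
      exact contains_slice_false _ _ _ (take_not_mem hwmem hpre hmlt)
    have htake : t.take w.length = w := (List.prefix_iff_eq_take.mp hpre).symm
    obtain ⟨u, humem, hul⟩ := List.mem_map.mp hwmem
    have hslice : PySem.Str.slice riga (some (k : Int)) (some ((k : Int) + (w.length : Int))) = u := by
      apply String.toList_inj.mp
      rw [slice_toList, ← ht, htake, hul]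
    have hct : numeriLettere.contains
        (PySem.Str.slice riga (some (k : Int)) (some ((k : Int) + (w.length : Int)))) = true := by
      rw [hslice, List.contains_iff_mem]
      exact humem
    have h9 : idx < 9 := by simpa [wordsC, numeriLettere] using hidx
    have huidx : u = numeriLettere[idx]'(by simpa [wordsC] using hidx) := by
      apply String.toList_inj.mp
      rw [hul, ← hwdef]
      simp [wordsC]
    have hindex : ∀ i, (h : i < 9) → PySem.List.index? numeriLettere numeriLettere[i] = some i := by
      decide
    have hidxval : PySem.List.index? numeriLettere
        (PySem.Str.slice riga (some (k : Int)) (some ((k : Int) + (w.length : Int)))) = some idx := by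
      rw [hslice, huidx]
      exact hindex idx h9
    have hres : PySem.Int.toStr (((some idx).getD 0 : Nat) + 1 : Int) = (digitAt t).getD "" := by
      simp [digitAt, hm]
    rcases words_len w hwmem with hl | hl | hl
    · rw [hl] at hcf hct hidxval
      simp only [innerA, e1, e2, e3, e4, e5]
      rw [hcf 1 (by omega), hcf 2 (by omega)]
      simp only [Bool.false_eq_true, if_false]
      rw [hct, if_pos rfl, hidxval]
      simp [digitAt, hm]
    · rw [hl] at hcf hct hidxval
      simp only [innerA, e1, e2, e3, e4, e5]
      rw [hcf 1 (by omega), hcf 2 (by omega), hcf 3 (by omega)]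
      simp only [Bool.false_eq_true, if_false]
      rw [hct, if_pos rfl, hidxval]
      simp [digitAt, hm]
    · rw [hl] at hcf hct hidxval
      simp only [innerA, e1, e2, e3, e4, e5]
      rw [hcf 1 (by omega), hcf 2 (by omega), hcf 3 (by omega), hcf 4 (by omega)]
      simp only [Bool.false_eq_true, if_false]
      rw [hct, if_pos rfl, hidxval]
      simp [digitAt, hm]

lemma foldl_strAppend {α : Type} (l : List α) (g : α → String) (a : String) :
    (l.foldl (fun st k => st ++ g k) a).toList = a.toList ++ l.flatMap (fun k => (g k).toList) := by
  induction l generalizing a with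
  | nil => simp
  | cons x xs ih => simp [ih, String.toList_append]

lemma A_toList (riga : String) :
    (traduciRiga riga).toList
      = ((List.range riga.toList.length).map
          (fun k => ((digitAt (riga.toList.drop k)).getD "").toList)).flatten := by
  unfold traduciRiga
  rw [PySem.Str.len_eq, PySem.List.pyRange_zero_natCast, List.foldl_map]
  rw [PySem.List.foldl_congr_mem (List.range riga.toList.length) _
    (fun st (k : Nat) => st ++ innerA riga (k : Int) [0, 1, 2, 3, 4]) ""
    (by
      intro st k hk
      rw [List.mem_range] at hk
      rw [PySem.Str.pyGet?_natCast, List.getElem?_eq_getElem hk]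
      simp [listaNumeri])]
  rw [foldl_strAppend]
  simp only [String.toList_empty, List.nil_append, List.flatMap_def]
  congr 1
  apply List.map_congr_left
  intro k _
  rw [innerA_eq]

-- ---------- B-side characterisation ----------

lemma filter_range_min (q : Nat → Bool) (k p n : Nat) (hkp : k ≤ p) (hpn : p < n)
    (hqp : q p = true) (hmin : ∀ i, k ≤ i → i < p → q i = false) :
    (List.range n).filter (fun i => decide (k ≤ i) && q i)
      = p :: (List.range n).filter (fun i => decide (p + 1 ≤ i) && q i) := by
  induction n with
  | zero => omega
  | succ m ih =>
    rcases Nat.lt_or_ge p m with hpm | hpm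
    · rw [List.range_succ, List.filter_append, List.filter_append, ih hpm]
      simp only [List.filter_cons, List.filter_nil]
      have h1 : decide (k ≤ m) = true := by simp; omega
      have h2 : decide (p + 1 ≤ m) = true := by simp; omega
      rw [h1, h2]
      simp
    · have hpm' : p = m := by omega
      subst hpm'
      rw [List.range_succ, List.filter_append, List.filter_append]
      have hnil1 : (List.range p).filter (fun i => decide (k ≤ i) && q i) = [] := by
        rw [List.filter_eq_nil_iff]
        intro a ha
        simp only [List.mem_range] at ha
        by_cases hka : k ≤ a
        · simp [hmin a hka ha]
        · simp [hka]
      have hnil2 : (List.range p).filter (fun i => decide (p + 1 ≤ i) && q i) = [] := by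
        rw [List.filter_eq_nil_iff]
        intro a ha
        simp only [List.mem_range] at ha
        have : ¬ (p + 1 ≤ a) := by omega
        simp [this]
      rw [hnil1, hnil2]
      simp [hqp, hkp]

lemma collect_spec (riga w d : String) (hw : w.toList ≠ []) :
    ∀ (fuel k : Nat), k ≤ riga.toList.length → riga.toList.length + 1 - k ≤ fuel →
    collectB riga w d (k : Int) fuel
      = ((List.range riga.toList.length).filter
          (fun i => decide (k ≤ i) && decide (w.toList <+: riga.toList.drop i))).map
          (fun i : Nat => ((i : Int), d)) := by
  intro fuel
  induction fuel with
  | zero => intro k hk hf; omega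
  | succ fuel ih =>
    intro k hk hf
    show (let pos := PySem.Str.findFrom riga w (k : Int);
      if pos = -1 then [] else (pos, d) :: collectB riga w d (pos + 1) fuel) = _
    simp only [PySem.Str.findFrom_eq]
    by_cases hneg : PySem.Chars.findFrom riga.toList w.toList (k : Int) none = -1
    · rw [if_pos hneg]
      have hnone : ¬ w.toList <:+: riga.toList.drop k :=
        (PySem.Chars.findFrom_natCast_eq_neg_one_iff riga.toList w.toList k hk).mp hneg
      symm
      rw [List.map_eq_nil_iff, List.filter_eq_nil_iff]
      intro a ha
      simp only [List.mem_range] at ha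
      by_cases hka : k ≤ a
      · suffices hns : ¬ w.toList <+: riga.toList.drop a by simp [hns]
        intro hp
        apply hnone
        have : riga.toList.drop a = (riga.toList.drop k).drop (a - k) := by
          rw [List.drop_drop]; congr 1; omega
        rw [this] at hp
        exact hp.isInfix.trans (List.drop_suffix _ _).isInfix
      · simp [hka]
    · obtain ⟨hge, hpre, hmin⟩ :=
        PySem.Chars.findFrom_natCast_spec riga.toList w.toList k hk hneg
      rw [if_neg hneg]
      set pos := PySem.Chars.findFrom riga.toList w.toList (k : Int) none with hpos
      set p := pos.toNat with hp
      have hposnn : 0 ≤ pos := le_trans (by positivity) hge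
      have hposp : pos = (p : Int) := Int.eq_natCast_toNat.mpr hposnn
      have hkp : k ≤ p := by omega
      have hplt : p < riga.toList.length := by
        have : riga.toList.drop p ≠ [] := by
          intro hnil
          rw [hnil] at hpre
          exact hw (List.prefix_nil.mp hpre)
        exact List.length_lt_of_drop_ne_nil this
      rw [filter_range_min (fun i => decide (w.toList <+: riga.toList.drop i)) k p
        riga.toList.length hkp hplt (by simp [hpre]) (by intro i h1 h2; simp [hmin i h1 h2])]
      rw [List.map_cons]
      congr 1
      · rw [hposp]
      · rw [hposp]
        have : ((p : Int) + 1) = ((p + 1 : Nat) : Int) := by push_cast; ring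
        rw [this]
        exact ih (p + 1) (by omega) (by omega)

lemma henum : PySem.List.enumerate numeriLettere
    = [((0 : Int), "one"), (1, "two"), (2, "three"), (3, "four"), (4, "five"),
       (5, "six"), (6, "seven"), (7, "eight"), (8, "nine")] := by decide

lemma matches_eq (riga : String) :
    ((PySem.List.enumerate numeriLettere).foldl
      (fun acc p => acc ++ collectB riga p.2 (PySem.Int.toStr (p.1 + 1)) 0 (riga.toList.length + 1)) [])
    = (PySem.List.enumerate numeriLettere).flatMap
        (fun p => occPairs riga.toList p.2.toList (PySem.Int.toStr (p.1 + 1))) := by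
  rw [PySem.List.foldl_append_eq_flatMap, List.nil_append]
  apply List.flatMap_congr
  intro p hp
  have hw : p.2.toList ≠ [] := by
    rw [henum] at hp
    fin_cases hp <;> decide
  have h0 : ((0 : Nat) : Int) = (0 : Int) := by simp
  rw [← h0, collect_spec riga p.2 _ hw (riga.toList.length + 1) 0 (by omega) (by omega)]
  simp only [occPairs]
  have : (fun i => decide ((0 : Nat) ≤ i) && decide (p.2.toList <+: riga.toList.drop i))
      = (fun i => decide (p.2.toList <+: riga.toList.drop i)) := by
    funext i
    simp
  rw [this]

lemma mem_occPairs {s w : List Char} {d : String} {x : Int × String} :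
    x ∈ occPairs s w d ↔ ∃ i : Nat, i < s.length ∧ w <+: s.drop i ∧ x = ((i : Int), d) := by
  unfold occPairs
  simp only [List.mem_map, List.mem_filter, List.mem_range, decide_eq_true_eq]
  constructor
  · rintro ⟨i, ⟨hi, hpre⟩, rfl⟩
    exact ⟨i, hi, hpre, rfl⟩
  · rintro ⟨i, hi, hpre, rfl⟩
    exact ⟨i, ⟨hi, hpre⟩, rfl⟩

lemma mem_target {s : List Char} {x : Int × String} :
    x ∈ target s ↔ ∃ idx : Nat, ∃ w, wordsC[idx]? = some w ∧
      ∃ i : Nat, i < s.length ∧ w <+: s.drop i ∧ x = ((i : Int), PySem.Int.toStr ((idx : Int) + 1)) := by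
  unfold target
  simp only [List.mem_filterMap, List.mem_range, Option.map_eq_some_iff]
  constructor
  · rintro ⟨i, hi, d, hd, rfl⟩
    unfold digitAt at hd
    obtain ⟨idx, hmi, rfl⟩ := Option.map_eq_some_iff.mp hd
    obtain ⟨w, hwg, hpre⟩ := matchIdx_some_iff.mp hmi
    exact ⟨idx, w, hwg, i, hi, hpre, rfl⟩
  · rintro ⟨idx, w, hwg, i, hi, hpre, rfl⟩
    refine ⟨i, hi, PySem.Int.toStr ((idx : Int) + 1), ?_, rfl⟩
    unfold digitAt
    rw [matchIdx_some_iff.mpr ⟨w, hwg, hpre⟩]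
    rfl

lemma mem_flatMap_occ {riga : String} {x : Int × String} :
    x ∈ (PySem.List.enumerate numeriLettere).flatMap
        (fun p => occPairs riga.toList p.2.toList (PySem.Int.toStr (p.1 + 1)))
      ↔ ∃ idx : Nat, ∃ w, wordsC[idx]? = some w ∧
        ∃ i : Nat, i < riga.toList.length ∧ w <+: riga.toList.drop i ∧
          x = ((i : Int), PySem.Int.toStr ((idx : Int) + 1)) := by
  rw [List.mem_flatMap]
  constructor
  · rintro ⟨p, hp, hx⟩
    have hmem2 : ∃ idx : Nat, p.1 = (idx : Int) ∧ numeriLettere[idx]? = some p.2 := by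
      rw [henum] at hp
      fin_cases hp
      exacts [⟨0, by decide, by decide⟩, ⟨1, by decide, by decide⟩, ⟨2, by decide, by decide⟩,
        ⟨3, by decide, by decide⟩, ⟨4, by decide, by decide⟩, ⟨5, by decide, by decide⟩,
        ⟨6, by decide, by decide⟩, ⟨7, by decide, by decide⟩, ⟨8, by decide, by decide⟩]
    obtain ⟨idx, hp1, hp2⟩ := hmem2
    obtain ⟨i, hi, hpre, rfl⟩ := mem_occPairs.mp hx
    refine ⟨idx, p.2.toList, ?_, i, hi, hpre, ?_⟩
    · rw [wordsC, List.getElem?_map, hp2]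
      rfl
    · rw [hp1]
  · rintro ⟨idx, w, hwg, i, hi, hpre, rfl⟩
    obtain ⟨hlt, hge⟩ := List.getElem?_eq_some_iff.mp hwg
    have hlt' : idx < numeriLettere.length := by simpa [wordsC] using hlt
    have hwval : w = (numeriLettere[idx]'hlt').toList := by
      rw [← hge]
      simp [wordsC]
    have hmem3 : ∀ j : Nat, (h : j < 9) →
        (((j : Nat) : Int), numeriLettere[j]'(by simpa [numeriLettere] using h))
          ∈ PySem.List.enumerate numeriLettere := by decide
    refine ⟨((idx : Int), numeriLettere[idx]'hlt'),
      hmem3 idx (by simpa [numeriLettere] using hlt'),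
      mem_occPairs.mpr ⟨i, hi, ?_, rfl⟩⟩
    rw [← hwval]
    exact hpre

lemma target_pairwise (s : List Char) :
    (target s).Pairwise (fun a b => a.1 < b.1) := by
  unfold target
  rw [List.pairwise_filterMap]
  apply List.Pairwise.imp _ (List.pairwise_lt_range (n := s.length))
  intro a b hab x hx y hy
  obtain ⟨d1, _, rfl⟩ := Option.map_eq_some_iff.mp hx
  obtain ⟨d2, _, rfl⟩ := Option.map_eq_some_iff.mp hy
  have : (a : Int) < (b : Int) := by exact_mod_cast hab
  exact this

lemma target_nodup (s : List Char) : (target s).Nodup :=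
  (target_pairwise s).imp (fun hab heq => by simp [heq] at hab)

lemma disj_occPairs {s w w' : List Char} {d d' : String} (hd : d ≠ d') :
    (occPairs s w d).Disjoint (occPairs s w' d') := by
  rw [List.disjoint_left]
  intro x hx hx'
  obtain ⟨i, _, _, rfl⟩ := mem_occPairs.mp hx
  obtain ⟨i', _, _, heq⟩ := mem_occPairs.mp hx'
  exact hd (by simpa using congrArg Prod.snd heq)

lemma matches_nodup (riga : String) :
    ((PySem.List.enumerate numeriLettere).flatMap
      (fun p => occPairs riga.toList p.2.toList (PySem.Int.toStr (p.1 + 1)))).Nodup := by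
  rw [List.nodup_flatMap]
  constructor
  · intro p _
    unfold occPairs
    apply List.Nodup.map
    · intro a b hab
      simpa using congrArg Prod.fst hab
    · exact List.Nodup.filter _ List.nodup_range
  · have hpw : (PySem.List.enumerate numeriLettere).Pairwise
        (fun p q => PySem.Int.toStr (p.1 + 1) ≠ PySem.Int.toStr (q.1 + 1)) := by
      rw [henum]; decide
    exact hpw.imp (fun h => disj_occPairs h)

lemma sorted_matches (riga : String) :
    PySem.List.sorted
      ((PySem.List.enumerate numeriLettere).foldl
        (fun acc p => acc ++ collectB riga p.2 (PySem.Int.toStr (p.1 + 1)) 0 (riga.toList.length + 1)) [])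
      (fun p => p.1)
    = target riga.toList := by
  rw [matches_eq]
  apply PySem.List.sorted_eq_of_perm_of_pairwise_lt
  · rw [List.perm_ext_iff_of_nodup (target_nodup _) (matches_nodup _)]
    intro x
    rw [mem_target, mem_flatMap_occ]
  · exact target_pairwise _

lemma join_empty (parts : List (List Char)) :
    PySem.Chars.join [] parts = parts.flatten := by
  induction parts with
  | nil => simp [PySem.Chars.join_nil]
  | cons p rest ih =>
    cases rest with
    | nil => simp [PySem.Chars.join, List.intercalate]
    | cons q r =>
      rw [PySem.Chars.join_cons_cons, List.flatten_cons, ← ih]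
      simp

lemma B_toList (riga : String) :
    (traduciRiga_alt riga).toList
      = ((target riga.toList).map (fun p => p.2.toList)).flatten := by
  simp only [traduciRiga_alt]
  rw [sorted_matches, PySem.Str.toList_join, show ("" : String).toList = [] from rfl, join_empty]
  exact congrArg List.flatten (by rw [List.map_map]; exact List.map_congr_left (fun p _ => rfl))

lemma flatten_eq (l : List Nat) (f : Nat → Option String) :
    (l.map (fun k => ((f k).getD "").toList)).flatten
      = ((l.filterMap (fun k => (f k).map (fun d => ((k : Int), d)))).map
          (fun p => p.2.toList)).flatten := by
  induction l with
  | nil => simp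
  | cons x xs ih =>
    cases hf : f x <;> simp [hf, ih]

-- ===== VERDICT (by name: the statement is the Claim_ definition above) =====
theorem traduciRiga_spec : Claim_equal_traduciRiga := by
  intro riga _
  show traduciRiga riga = traduciRiga_alt riga
  apply String.toList_inj.mp
  rw [A_toList, B_toList]
  unfold target
  exact flatten_eq _ _
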